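-- pv_equiv track=rewrite | github.com/meelisf/VUTT | scripts/1-1_consolidate_data.py | get_collection_hierarchy
-- ===== SOURCE A (Python) =====
-- def get_collection_hierarchy(collections, collection_id):
--     """
--     Tagastab kollektsiooni hierarhia (vanematest lapseni).
--     Näiteks: ["universitas-dorpatensis-1", "academia-gustaviana"]
--     """
--     if not collection_id or not collections:
--         return []
--
--     hierarchy = []
--     current_id = collection_id
--
--     while current_id:
--         hierarchy.insert(0, current_id)
--         collection = collections.get(current_id)
--         current_id = collection.get('parent') if collection else None
--
--     return hierarchy
-- ===== SOURCE B (Python) =====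
-- def get_collection_hierarchy(collections, collection_id):
--     """
--     Tagastab kollektsiooni hierarhia (vanematest lapseni).
--     Ehitab esmalt lameda vanema-indeksi ja kaib siis rekursiivselt mooda seda.
--     """
--     if not collection_id or not collections:
--         return []
--     parents = {cid: (coll.get('parent') if coll else None)
--                for cid, coll in collections.items()}
--
--     def walk(cid):
--         if not cid:
--             return []
--         return walk(parents.get(cid)) + [cid]
--
--     return walk(collection_id)
-- ===== Notes on version B (the rewrite author's own statement) =====
-- stated objective: alternative
-- what changed: B first builds a flat id->parent index in one pass over the dict and then walks that index with a recursion whose unwinding yields the ancestor-to-child order, replacing A's while-loop over nested dict lookups with hierarchy.insert(0, ...).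
import Mathlib
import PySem

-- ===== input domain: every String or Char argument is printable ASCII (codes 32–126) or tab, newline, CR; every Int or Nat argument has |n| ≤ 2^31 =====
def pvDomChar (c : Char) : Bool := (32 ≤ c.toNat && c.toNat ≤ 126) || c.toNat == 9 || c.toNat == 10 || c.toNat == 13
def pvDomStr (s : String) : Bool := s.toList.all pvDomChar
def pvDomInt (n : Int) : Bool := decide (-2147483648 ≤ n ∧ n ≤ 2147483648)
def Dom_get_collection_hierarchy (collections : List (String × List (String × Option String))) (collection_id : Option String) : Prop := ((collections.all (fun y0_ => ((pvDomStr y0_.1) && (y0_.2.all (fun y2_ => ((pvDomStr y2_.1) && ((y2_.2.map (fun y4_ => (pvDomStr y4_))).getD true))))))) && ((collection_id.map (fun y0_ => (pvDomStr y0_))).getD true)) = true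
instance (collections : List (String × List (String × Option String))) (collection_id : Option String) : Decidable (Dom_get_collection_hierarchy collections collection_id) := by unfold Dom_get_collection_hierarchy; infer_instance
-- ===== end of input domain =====

-- B builds a flat id->parent index in one pass and then walks it by a recursion whose
-- unwinding yields the ancestor-to-child order (objective: alternative decomposition).
-- On a cyclic parent chain the Python A loops forever and B overflows the recursion;
-- both ports are made total with the same fuel bound (exhausted only on such cycles).

-- ===== PORT A =====

-- Python truthiness of `collection_id` / `current_id` (an Option String): None and "" are falsy.
def pvTruthy (o : Option String) : Bool :=
  match o with
  | none => false
  | some s => s ≠ ""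

-- first-match association-list lookup = Python dict .get(k) (returns None when absent)
def pvLookup {α : Type} : List (String × α) → String → Option α
  | [], _ => none
  | (k, v) :: rest, x => if k == x then some v else pvLookup rest x

-- `collection.get('parent') if collection else None` (an empty dict is falsy)
def pvParentStep (collections : List (String × List (String × Option String))) (cur : String) : Option String :=
  match pvLookup collections cur with
  | none => none
  | some collection =>
      if collection.isEmpty then none
      else (pvLookup collection "parent").join

-- the `while current_id:` loop; fuel makes it total in Lean (exhausted only on a cyclic parent chain, where the Python loops forever)
def pvALoop (collections : List (String × List (String × Option String))) :
    Nat → Option String → List String → List String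
  | 0, _, hierarchy => hierarchy
  | fuel + 1, current_id, hierarchy =>
      if pvTruthy current_id then
        let cur := current_id.getD ""
        -- hierarchy.insert(0, current_id)
        pvALoop collections fuel (pvParentStep collections cur) (cur :: hierarchy)
      else hierarchy

def get_collection_hierarchy (collections : List (String × List (String × Option String))) (collection_id : Option String) : List String :=
  if ¬ pvTruthy collection_id ∨ collections.isEmpty then []
  else pvALoop collections (collections.length + 1) collection_id []

-- ===== PORT B =====

-- `coll.get('parent') if coll else None`, used once per entry while building the index
def pvBParentOf (coll : List (String × Option String)) : Option String :=
  if coll = [] then none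
  else ((coll.find? (fun p => p.1 == "parent")).map Prod.snd).join

-- the dict comprehension `{cid: ... for cid, coll in collections.items()}`
def pvBParents (collections : List (String × List (String × Option String))) : List (String × Option String) :=
  collections.map (fun kv => (kv.1, pvBParentOf kv.2))

-- `walk`: recursion over the flat parent index; same fuel bound makes it total in Lean
def pvBWalk (parents : List (String × Option String)) : Nat → Option String → List String
  | 0, _ => []
  | fuel + 1, cid =>
      match cid with
      | none => []
      | some s =>
          if s = "" then []
          else pvBWalk parents fuel (((parents.find? (fun p => p.1 == s)).map Prod.snd).join) ++ [s]

def get_collection_hierarchy_alt (collections : List (String × List (String × Option String))) (collection_id : Option String) : List String :=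
  if collection_id = none ∨ collection_id = some "" ∨ collections = [] then []
  else pvBWalk (pvBParents collections) (collections.length + 1) collection_id

-- ===== PRECONDITION & SPEC =====
def Spec_get_collection_hierarchy (collections : List (String × List (String × Option String))) (collection_id : Option String) (out : List String) : Prop := out = get_collection_hierarchy_alt collections collection_id
instance (collections : List (String × List (String × Option String))) (collection_id : Option String) (out : List String) : Decidable (Spec_get_collection_hierarchy collections collection_id out) := by unfold Spec_get_collection_hierarchy; infer_instance

-- ===== CLAIM (what is proved, stated in full; the proofs are below) =====
def Claim_equal_get_collection_hierarchy : Prop := ∀ (collections : List (String × List (String × Option String))) (collection_id : Option String), Dom_get_collection_hierarchy collections collection_id → Spec_get_collection_hierarchy collections collection_id (get_collection_hierarchy collections collection_id)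

-- ===== LEMMAS AND PROOFS =====


-- dict.get on a sub-dict equals first-match lookup
theorem pvLookup_eq_find? (coll : List (String × Option String)) (k : String) :
    pvLookup coll k = ((coll.find? (fun p => p.1 == k)).map Prod.snd) := by
  induction coll with
  | nil => simp [pvLookup]
  | cons hd tl ih =>
      obtain ⟨a, b⟩ := hd
      by_cases h : a == k
      · simp [pvLookup, List.find?, h]
      · simp [pvLookup, List.find?, h, ih]

-- looking a key up in B's prebuilt parent index is A's per-step parent computation
theorem find?_pvBParents (collections : List (String × List (String × Option String))) (s : String) :
    (((pvBParents collections).find? (fun p => p.1 == s)).map Prod.snd).join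
      = pvParentStep collections s := by
  induction collections with
  | nil => simp [pvBParents, pvParentStep, pvLookup]
  | cons hd tl ih =>
      obtain ⟨k, coll⟩ := hd
      by_cases h : k == s
      · simp [pvBParents, pvParentStep, pvLookup, List.find?, h, pvBParentOf,
              pvLookup_eq_find?, List.isEmpty_iff]
      · simpa [pvBParents, pvParentStep, pvLookup, List.find?, h] using ih

-- loop/recursion correspondence: A's accumulator loop is B's walk followed by ++ acc
theorem pvALoop_eq_pvBWalk (collections : List (String × List (String × Option String)))
    (fuel : Nat) (cur : Option String) (acc : List String) :
    pvALoop collections fuel cur acc = pvBWalk (pvBParents collections) fuel cur ++ acc := by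
  induction fuel generalizing cur acc with
  | zero => simp [pvALoop, pvBWalk]
  | succ n ih =>
      match cur with
      | none => simp [pvALoop, pvBWalk, pvTruthy]
      | some s =>
          by_cases h : s = ""
          · simp [pvALoop, pvBWalk, pvTruthy, h]
          · simp [pvALoop, pvBWalk, pvTruthy, h, ih, find?_pvBParents]

-- ===== VERDICT (by name: the statement is the Claim_ definition above) =====
theorem get_collection_hierarchy_spec : Claim_equal_get_collection_hierarchy := by
  intro collections collection_id _
  unfold Spec_get_collection_hierarchy get_collection_hierarchy get_collection_hierarchy_alt
  by_cases hg : collection_id = none ∨ collection_id = some "" ∨ collections = []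
  · rw [if_pos hg, if_pos]
    · rcases hg with h | h | h <;>
        simp_all [pvTruthy, List.isEmpty_iff]
  · push_neg at hg
    obtain ⟨h1, h2, h3⟩ := hg
    have hB : ¬ (collection_id = none ∨ collection_id = some "" ∨ collections = []) := by
      tauto
    have hT : pvTruthy collection_id = true := by
      match collection_id, h1, h2 with
      | some s, _, hne => simpa [pvTruthy] using fun h => hne (by rw [h])
    have hA : ¬ (¬ pvTruthy collection_id = true ∨ collections.isEmpty = true) := by
      simp [hT, List.isEmpty_iff, h3]
    rw [if_neg hA, if_neg hB]
    exact (pvALoop_eq_pvBWalk collections _ collection_id []).trans (by simp)
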